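-- pv_equiv track=rewrite | github.com/qy527145/PerfectDou | src/perfectdou/battle_assistant/card_parser.py | validate_cards
-- ===== SOURCE A (Python) =====
-- from typing import List, Dict, Union, Optional
--
-- def validate_cards(cards: List[int]) -> bool:
--     """验证牌型是否合法（不超过标准牌数）"""
--     # 统计每种牌的数量
--     card_count = {}
--     for card in cards:
--         card_count[card] = card_count.get(card, 0) + 1
--
--     # 检查数量限制
--     for card, count in card_count.items():
--         if card in [20, 30]:  # 王牌只能有1张
--             if count > 1:
--                 return False
--         else:  # 其他牌最多4张
--             if count > 4:
--                 return False
--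
--     return True
-- ===== SOURCE B (Python) =====
-- def validate_cards(cards):
--     """验证牌型是否合法（不超过标准牌数）"""
--     s = sorted(cards)
--     i, n = 0, len(s)
--     while i < n:
--         j = i + 1
--         while j < n and s[j] == s[i]:
--             j += 1
--         limit = 1 if s[i] in (20, 30) else 4
--         if j - i > limit:
--             return False
--         i = j
--     return True
-- ===== Notes on version B (the rewrite author's own statement) =====
-- stated objective: alternative
-- what changed: Replaces the counting dict and table walk by sort-then-run-scan: sort the cards once and check each maximal run of equal cards against its per-card limit (1 for jokers 20/30, 4 otherwise).
import Mathlib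
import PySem

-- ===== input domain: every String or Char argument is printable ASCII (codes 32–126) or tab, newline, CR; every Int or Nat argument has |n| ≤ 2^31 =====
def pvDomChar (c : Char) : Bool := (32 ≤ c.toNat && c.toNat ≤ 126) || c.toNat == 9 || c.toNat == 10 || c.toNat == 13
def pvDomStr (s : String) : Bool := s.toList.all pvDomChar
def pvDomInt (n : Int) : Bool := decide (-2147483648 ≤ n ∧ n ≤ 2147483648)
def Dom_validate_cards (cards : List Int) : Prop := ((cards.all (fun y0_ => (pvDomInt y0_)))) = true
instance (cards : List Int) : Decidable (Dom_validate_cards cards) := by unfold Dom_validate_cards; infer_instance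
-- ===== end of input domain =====

-- B replaces the counting dict by sort-then-run-scan: sort once, check each maximal run of
-- equal cards against its per-card limit (1 for jokers 20/30, 4 otherwise). Objective: alternative.

-- ===== PORT A =====
-- A's second loop: walks card_count.items(), returning False on the first violation.
def validateItems : List (Int × Int) → Bool
  | [] => true
  | (card, count) :: rest =>
    if card = 20 ∨ card = 30 then
      if count > 1 then false else validateItems rest
    else
      if count > 4 then false else validateItems rest

def validate_cards (cards : List Int) : Bool :=
  let card_count : PySem.Dict Int Int :=
    cards.foldl (fun d card => d.insert card (d.getD card 0 + 1)) PySem.Dict.empty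
  validateItems card_count.items

-- ===== PORT B =====
-- B's outer while over the sorted list: the inner 'while s[j]==s[i]' run is the takeWhile
-- prefix, 'i = j' continues on the dropWhile suffix; j - i is the run length.
def checkRuns : List Int → Bool
  | [] => true
  | x :: rest =>
    let run : Int := ((rest.takeWhile (fun y => y == x)).length : Int) + 1
    if run > (if x = 20 ∨ x = 30 then (1 : Int) else 4) then false
    else checkRuns (rest.dropWhile (fun y => y == x))
termination_by l => l.length
decreasing_by
  exact Nat.lt_succ_of_le (List.length_dropWhile_le _ _)

def validate_cards_alt (cards : List Int) : Bool :=
  checkRuns (PySem.List.sorted cards (fun x => x) false)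

-- ===== PRECONDITION & SPEC =====
def Spec_validate_cards (cards : List Int) (out : Bool) : Prop := out = validate_cards_alt cards
instance (cards : List Int) (out : Bool) : Decidable (Spec_validate_cards cards out) := by unfold Spec_validate_cards; infer_instance

-- ===== CLAIM (what is proved, stated in full; the proofs are below) =====
def Claim_equal_validate_cards : Prop := ∀ (cards : List Int), Dom_validate_cards cards → Spec_validate_cards cards (validate_cards cards)

-- ===== LEMMAS AND PROOFS =====

def limitOf (x : Int) : Int := if x = 20 ∨ x = 30 then 1 else 4

-- ---- A side: the item walk is the per-distinct-card bound ----
theorem validateItems_map_eq_all (cards : List Int) (l : List Int) :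
    validateItems (l.map (fun k => (k, (cards.count k : Int)))) =
      l.all (fun card => decide ((cards.count card : Int) ≤ limitOf card)) := by
  induction l with
  | nil => rfl
  | cons x xs ih =>
    simp only [List.map_cons, validateItems, List.all_cons, ih, limitOf]
    split_ifs <;> simp_all

theorem validate_cards_iff (cards : List Int) :
    validate_cards cards = true ↔ ∀ x ∈ cards, (cards.count x : Int) ≤ limitOf x := by
  show validateItems (cards.foldl (fun d card => d.insert card (d.getD card 0 + 1))
      PySem.Dict.empty).items = true ↔ _
  rw [PySem.Dict.foldl_insert_getD_add_one_eq_counter, PySem.Dict.items_counter,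
    validateItems_map_eq_all]
  simp [List.all_eq_true, PySem.Set.mem_ofList]

-- ---- B side: run splitting on a sorted list ----
theorem run_split (x : Int) (rest : List Int) (h : (x :: rest).Pairwise (· ≤ ·)) :
    (∀ y ∈ rest.takeWhile (fun y => y == x), y = x) ∧
      x ∉ rest.dropWhile (fun y => y == x) := by
  induction rest with
  | nil => simp
  | cons a as ih =>
    rcases List.pairwise_cons.mp h with ⟨hx, ha⟩
    by_cases hax : a = x
    · subst hax
      have h' : (a :: as).Pairwise (· ≤ ·) := by
        refine List.pairwise_cons.mpr ⟨?_, (List.pairwise_cons.mp ha).2⟩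
        intro y hy; exact hx y (List.mem_cons_of_mem _ hy)
      rcases ih h' with ⟨ht, hd⟩
      constructor
      · intro y hy
        simp only [List.takeWhile_cons, beq_self_eq_true, if_pos] at hy
        rcases List.mem_cons.mp hy with rfl | hy'
        · rfl
        · exact ht y hy'
      · simpa [List.dropWhile_cons] using hd
    · have hne : (a == x) = false := by simp [hax]
      constructor
      · intro y hy; simp [hne] at hy
      · simp only [List.dropWhile_cons, hne, Bool.false_eq_true, if_neg, not_false_iff]
        intro hmem
        rcases List.mem_cons.mp hmem with rfl | hmem'
        · exact hax rfl
        · -- x ∈ as: but x < a ≤ every element of as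
          have hxa : x < a := lt_of_le_of_ne (hx a (List.mem_cons_self)) (fun e => hax e.symm)
          have : a ≤ x := (List.pairwise_cons.mp ha).1 x hmem'
          omega

theorem checkRuns_iff (l : List Int) (h : l.Pairwise (· ≤ ·)) :
    checkRuns l = true ↔ ∀ x ∈ l, (l.count x : Int) ≤ limitOf x := by
  induction l using checkRuns.induct with
  | case1 => simp [checkRuns]
  | case2 x rest run hcond =>
    have hrun : ((rest.takeWhile (fun y => y == x)).length : Int) + 1 >
        (if x = 20 ∨ x = 30 then (1 : Int) else 4) := hcond
    rcases run_split x rest h with ⟨ht, -⟩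
    set t := rest.takeWhile (fun y => y == x) with htdef
    set d := rest.dropWhile (fun y => y == x) with hddef
    have hsplit : rest = t ++ d := (List.takeWhile_append_dropWhile).symm
    have hct : t.count x = t.length := by
      rw [List.count_eq_length]; intro y hy; exact ((ht y hy).symm ▸ rfl)
    have hcd0 : d.count x = 0 :=
      List.count_eq_zero.mpr (run_split x rest h).2
    have hcx : (x :: rest).count x = t.length + 1 := by
      rw [List.count_cons_self, hsplit, List.count_append, hct, hcd0]
    rw [checkRuns.eq_def]
    simp only [← htdef, ← hddef]
    rw [if_pos (htdef ▸ hrun)]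
    simp only [Bool.false_eq_true, false_iff]
    intro hall
    have hb := hall x List.mem_cons_self
    rw [hcx] at hb
    simp only [limitOf] at hb
    split_ifs at hb hrun <;> push_cast at hb hrun <;> omega
  | case3 x rest run hcond ih =>
    have hrun : ¬ ((rest.takeWhile (fun y => y == x)).length : Int) + 1 >
        (if x = 20 ∨ x = 30 then (1 : Int) else 4) := hcond
    rcases run_split x rest h with ⟨ht, hd⟩
    set t := rest.takeWhile (fun y => y == x) with htdef
    set d := rest.dropWhile (fun y => y == x) with hddef
    have hsplit : rest = t ++ d := (List.takeWhile_append_dropWhile).symm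
    have hpd : d.Pairwise (· ≤ ·) :=
      List.Pairwise.sublist (List.dropWhile_sublist _) (List.pairwise_cons.mp h).2
    have hct : t.count x = t.length := by
      rw [List.count_eq_length]; intro y hy; exact ((ht y hy).symm ▸ rfl)
    have hcd0 : d.count x = 0 := List.count_eq_zero.mpr hd
    have hcx : (x :: rest).count x = t.length + 1 := by
      rw [List.count_cons_self, hsplit, List.count_append, hct, hcd0]
    have hcy : ∀ y ∈ d, (x :: rest).count y = d.count y := by
      intro y hy
      have hyx : y ≠ x := fun e => hd (e ▸ hy)
      have hcty : t.count y = 0 := List.count_eq_zero.mpr (fun hyt => hyx (ht y hyt))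
      rw [List.count_cons_of_ne (Ne.symm hyx), hsplit, List.count_append, hcty, Nat.zero_add]
    rw [checkRuns.eq_def]
    simp only [← htdef, ← hddef]
    rw [if_neg (htdef ▸ hrun)]
    rw [ih hpd]
    constructor
    · intro hdd y hy
      rcases List.mem_cons.mp hy with rfl | hy'
      · rw [hcx]; simp only [limitOf] at hrun ⊢
        split_ifs at hrun ⊢ <;> push_cast at hrun ⊢ <;> omega
      · rcases List.mem_append.mp (hsplit ▸ hy') with hyt | hyd
        · rw [ht y hyt, hcx]; simp only [limitOf] at hrun ⊢
          split_ifs at hrun ⊢ <;> push_cast at hrun ⊢ <;> omega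
        · rw [hcy y hyd]; exact hdd y hyd
    · intro hall y hy
      rw [← hcy y hy]
      exact hall y (List.mem_cons_of_mem _
        (hsplit ▸ List.mem_append.mpr (Or.inr hy)))

theorem validate_cards_alt_iff (cards : List Int) :
    validate_cards_alt cards = true ↔ ∀ x ∈ cards, (cards.count x : Int) ≤ limitOf x := by
  unfold validate_cards_alt
  have hperm := PySem.List.sorted_perm cards (fun x => x) false
  rw [checkRuns_iff _ (by simpa using PySem.List.sorted_pairwise cards (fun x => x))]
  constructor
  · intro hs y hy
    rw [← hperm.count_eq]
    exact hs y (hperm.mem_iff.mpr hy)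
  · intro hs y hy
    rw [hperm.count_eq]
    exact hs y (hperm.mem_iff.mp hy)

-- ===== VERDICT (by name: the statement is the Claim_ definition above) =====
theorem validate_cards_spec : Claim_equal_validate_cards := by
  intro cards _
  show validate_cards cards = validate_cards_alt cards
  rw [Bool.eq_iff_iff, validate_cards_iff, validate_cards_alt_iff]
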